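-- pv_equiv track=rewrite | github.com/Lewdwig-V/unslop | unslop/scripts/dependencies/unified_dag.py | _compute_parallel_batches
-- ===== SOURCE A (Python) =====
-- def _compute_parallel_batches(
--     sorted_entries: list[dict],
--     graph: dict[str, set[str]],
--     max_batch_size: int = 8,
-- ) -> list[list[dict]]:
--     """Partition sorted plan entries into parallel-safe batches via Kahn's.
--
--     Two entries are in the same batch iff neither's spec is an ancestor of
--     the other's in the unified DAG.  This is computed by running Kahn's
--     algorithm and grouping nodes by topological depth.
--
--     Args:
--         sorted_entries: Plan entries already sorted in topo order.
--         graph: spec -> set of dependency specs (edges point to deps).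
--         max_batch_size: Maximum files per batch.
--
--     Returns:
--         List of batches (each batch is a list of plan entry dicts).
--     """
--     if not sorted_entries:
--         return []
--
--     # Build the subgraph restricted to specs in the plan
--     plan_specs = {e["spec"] for e in sorted_entries}
--     sub_graph: dict[str, set[str]] = {}
--     for spec in plan_specs:
--         sub_graph[spec] = graph.get(spec, set()) & plan_specs
--
--     # Compute in-degrees
--     in_degree: dict[str, int] = {s: 0 for s in plan_specs}
--     # Build forward edges (successors) for Kahn's
--     successors: dict[str, set[str]] = {s: set() for s in plan_specs}
--     for spec, deps in sub_graph.items():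
--         in_degree[spec] = len(deps)
--         for dep in deps:
--             successors.setdefault(dep, set()).add(spec)
--
--     # Kahn's with depth tracking: each "wave" of zero-in-degree nodes
--     # forms one parallel batch
--     spec_to_entry: dict[str, list[dict]] = {}
--     for entry in sorted_entries:
--         spec_to_entry.setdefault(entry["spec"], []).append(entry)
--
--     batches: list[list[dict]] = []
--     queue = sorted(s for s in plan_specs if in_degree[s] == 0)
--
--     while queue:
--         # All nodes in queue can run in parallel
--         wave_entries: list[dict] = []
--         for spec in queue:
--             wave_entries.extend(spec_to_entry.get(spec, []))
--
--         # Split wave into max_batch_size chunks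
--         for i in range(0, len(wave_entries), max_batch_size):
--             batches.append(wave_entries[i : i + max_batch_size])
--
--         # Decrement in-degrees for successors
--         next_queue = []
--         for spec in queue:
--             for succ in successors.get(spec, set()):
--                 in_degree[succ] -= 1
--                 if in_degree[succ] == 0:
--                     next_queue.append(succ)
--         queue = sorted(next_queue)
--
--     # If a cycle left unvisited nodes, emit them so callers always get
--     # actionable batches for every entry in sorted_entries.
--     visited = {s for batch in batches for e in batch for s in [e["spec"]]}
--     remaining = sorted(plan_specs - visited)
--     if remaining:
--         wave_entries = []
--         for spec in remaining:
--             wave_entries.extend(spec_to_entry.get(spec, []))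
--         for i in range(0, len(wave_entries), max_batch_size):
--             batches.append(wave_entries[i : i + max_batch_size])
--
--     return batches
-- ===== SOURCE B (Python) =====
-- def _compute_parallel_batches(
--     sorted_entries: list[dict],
--     graph: dict[str, set[str]],
--     max_batch_size: int = 8,
-- ) -> list[list[dict]]:
--     """Partition sorted plan entries into parallel-safe batches.
--
--     Alternative formulation: instead of Kahn's in-degree/successor
--     bookkeeping, repeatedly peel off the (sorted) set of not-yet-done
--     specs whose in-plan dependencies are all done; each peel is one
--     wave, chunked into max_batch_size batches.  Specs that never become
--     ready (on or downstream of a cycle) are emitted last.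
--     """
--     if not sorted_entries:
--         return []
--
--     plan_specs = {e["spec"] for e in sorted_entries}
--     deps = {s: graph.get(s, set()) & plan_specs for s in plan_specs}
--
--     spec_to_entry: dict[str, list[dict]] = {}
--     for entry in sorted_entries:
--         spec_to_entry.setdefault(entry["spec"], []).append(entry)
--
--     batches: list[list[dict]] = []
--
--     def emit(specs: list[str]) -> None:
--         wave = [e for s in specs for e in spec_to_entry[s]]
--         for i in range(0, len(wave), max_batch_size):
--             batches.append(wave[i : i + max_batch_size])
--
--     done: set[str] = set()
--     alive = set(plan_specs)
--     while True:
--         current = sorted(s for s in alive if deps[s] <= done)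
--         if not current:
--             break
--         emit(current)
--         done |= set(current)
--         alive -= set(current)
--
--     if alive:
--         emit(sorted(alive))
--     return batches
-- ===== Notes on version B (the rewrite author's own statement) =====
-- stated objective: alternative
-- what changed: Replaces Kahn's algorithm (in-degree counters + reverse successor edges, with stragglers recomputed from the specs of the emitted batches) by repeated peeling of the sorted set of specs whose in-plan dependencies are all done, the never-ready (cyclic) specs being exactly what is left alive at the end.
import Mathlib
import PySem

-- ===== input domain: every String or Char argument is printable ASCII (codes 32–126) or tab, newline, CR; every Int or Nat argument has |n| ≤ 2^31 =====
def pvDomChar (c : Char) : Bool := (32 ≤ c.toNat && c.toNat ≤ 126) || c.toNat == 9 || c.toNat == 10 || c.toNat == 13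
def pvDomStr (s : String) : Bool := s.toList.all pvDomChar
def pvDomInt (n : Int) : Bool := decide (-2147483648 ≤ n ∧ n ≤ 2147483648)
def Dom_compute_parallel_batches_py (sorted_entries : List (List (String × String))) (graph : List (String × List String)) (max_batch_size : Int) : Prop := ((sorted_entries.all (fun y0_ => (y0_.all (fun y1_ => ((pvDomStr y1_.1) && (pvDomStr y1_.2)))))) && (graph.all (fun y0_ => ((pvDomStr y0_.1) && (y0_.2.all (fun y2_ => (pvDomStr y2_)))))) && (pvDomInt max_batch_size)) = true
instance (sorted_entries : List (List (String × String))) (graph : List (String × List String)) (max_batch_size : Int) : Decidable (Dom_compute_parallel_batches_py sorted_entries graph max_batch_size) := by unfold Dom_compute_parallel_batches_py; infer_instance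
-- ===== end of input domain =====

-- B replaces A's Kahn bookkeeping (in-degree counters + reverse successor edges, stragglers
-- recomputed from the emitted batches) by repeated peeling of the specs whose in-plan
-- dependencies are all done, with the never-ready specs left over directly; objective:
-- alternative decomposition, same exact output.

-- ===== PORT A =====

-- e["spec"]  (Pre_ guarantees the key is present wherever A reads it)
def pvSpecOf (e : List (String × String)) : String :=
  (PySem.Dict.mk e).getD "spec" ""

-- for i in range(0, len(wave), k): batches.append(wave[i:i+k])   (shared: identical code in A and B)
def pvChunks (batches : List (List (List (String × String))))
    (wave : List (List (String × String))) (k : Int) : List (List (List (String × String))) :=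
  (PySem.List.pyRange 0 (wave.length : Int) k).foldl
    (fun bs i => bs ++ [PySem.List.slice wave (some i) (some (i + k))]) batches

-- in_degree[succ] -= 1; if in_degree[succ] == 0: next_queue.append(succ)
def pvDecStep (st : PySem.Dict String Int × List String) (v : String) :
    PySem.Dict String Int × List String :=
  let d := st.1.modify v 0 (fun x => x - 1)
  if d.getD v 0 = 0 then (d, st.2 ++ [v]) else (d, st.2)

-- while queue: … (Kahn's waves; fuel ≥ number of iterations, supplied by the caller)
def pvKahnLoop (succs : PySem.Dict String (List String))
    (ed : PySem.Dict String (List (List (String × String)))) (k : Int) :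
    Nat → PySem.Dict String Int → List String → List (List (List (String × String))) →
      List (List (List (String × String)))
  | 0, _, _, batches => batches
  | fuel + 1, ind, queue, batches =>
    if queue = [] then batches
    else
      let wave_entries := queue.foldl (fun acc s => acc ++ ed.getD s []) []
      let batches' := pvChunks batches wave_entries k
      let st := queue.foldl (fun st s => (succs.getD s []).foldl pvDecStep st) (ind, ([] : List String))
      pvKahnLoop succs ed k fuel st.1 (PySem.List.sorted st.2 (fun x => x) false) batches'

def compute_parallel_batches_py (sorted_entries : List (List (String × String))) (graph : List (String × List String)) (max_batch_size : Int) : List (List (List (String × String))) :=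
  if sorted_entries = [] then []
  else
    let plan_specs : PySem.Set String := PySem.Set.ofList (sorted_entries.map pvSpecOf)
    let gd : PySem.Dict String (List String) := PySem.Dict.mk graph
    let sub_graph : PySem.Dict String (List String) :=
      plan_specs.foldl (fun d spec =>
        d.insert spec (PySem.Set.inter (PySem.Set.ofList (gd.getD spec [])) plan_specs)) PySem.Dict.empty
    let ind0 : PySem.Dict String Int :=
      plan_specs.foldl (fun d s => d.insert s 0) PySem.Dict.empty
    let succ0 : PySem.Dict String (List String) :=
      plan_specs.foldl (fun d s => d.insert s PySem.Set.empty) PySem.Dict.empty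
    let st : PySem.Dict String Int × PySem.Dict String (List String) :=
      sub_graph.items.foldl (fun st p =>
        (st.1.insert p.1 ((p.2.length : Int)),
         p.2.foldl (fun sd dep => sd.modify dep PySem.Set.empty (fun S => PySem.Set.add S p.1)) st.2))
        (ind0, succ0)
    let spec_to_entry : PySem.Dict String (List (List (String × String))) :=
      sorted_entries.foldl (fun d e => d.modify (pvSpecOf e) [] (fun l => l ++ [e])) PySem.Dict.empty
    let queue0 : List String :=
      PySem.List.sorted (plan_specs.filter (fun s => st.1.getD s 0 == 0)) (fun x => x) false
    let batches := pvKahnLoop st.2 spec_to_entry max_batch_size (sorted_entries.length + 1) st.1 queue0 []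
    let visited : PySem.Set String := PySem.Set.ofList (batches.flatten.map pvSpecOf)
    let remaining : List String :=
      PySem.List.sorted (PySem.Set.diff plan_specs visited) (fun x => x) false
    if remaining = [] then batches
    else
      pvChunks batches (remaining.foldl (fun acc s => acc ++ spec_to_entry.getD s []) []) max_batch_size

-- ===== PORT B =====

-- while True: current = sorted(s for s in alive if deps[s] <= done); … (returns batches and the final alive set)
def pvPeelLoop (dd : PySem.Dict String (List String))
    (ed : PySem.Dict String (List (List (String × String)))) (k : Int) :
    Nat → PySem.Set String → PySem.Set String → List (List (List (String × String))) →
      List (List (List (String × String))) × PySem.Set String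
  | 0, alive, _, batches => (batches, alive)
  | fuel + 1, alive, done, batches =>
    let current := PySem.List.sorted
      (alive.filter (fun s => PySem.Set.issubset (dd.getD s []) done)) (fun x => x) false
    if current = [] then (batches, alive)
    else
      pvPeelLoop dd ed k fuel
        (PySem.Set.diff alive (PySem.Set.ofList current))
        (PySem.Set.union done (PySem.Set.ofList current))
        (pvChunks batches (current.flatMap (fun s => ed.getD s [])) k)

def compute_parallel_batches_py_alt (sorted_entries : List (List (String × String))) (graph : List (String × List String)) (max_batch_size : Int) : List (List (List (String × String))) :=
  if sorted_entries = [] then []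
  else
    let plan_specs : PySem.Set String := PySem.Set.ofList (sorted_entries.map pvSpecOf)
    let gd : PySem.Dict String (List String) := PySem.Dict.mk graph
    let deps : PySem.Dict String (List String) :=
      plan_specs.foldl (fun d s =>
        d.insert s (PySem.Set.inter (PySem.Set.ofList (gd.getD s [])) plan_specs)) PySem.Dict.empty
    let spec_to_entry : PySem.Dict String (List (List (String × String))) :=
      sorted_entries.foldl (fun d e => d.modify (pvSpecOf e) [] (fun l => l ++ [e])) PySem.Dict.empty
    let r := pvPeelLoop deps spec_to_entry max_batch_size (sorted_entries.length + 1) plan_specs PySem.Set.empty []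
    if r.2 = [] then r.1
    else
      pvChunks r.1 ((PySem.List.sorted r.2 (fun x => x) false).flatMap (fun s => spec_to_entry.getD s []))
        max_batch_size

-- ===== PRECONDITION & SPEC =====

-- Pre_ excludes exactly the inputs on which the Python A raises: with a nonempty plan,
-- max_batch_size = 0 makes range() raise ValueError, and an entry without a "spec" key
-- raises KeyError.  (A is total on everything else, including negative batch sizes.)
def Pre_compute_parallel_batches_py (sorted_entries : List (List (String × String))) (graph : List (String × List String)) (max_batch_size : Int) : Prop :=
  sorted_entries = [] ∨
    (max_batch_size ≠ 0 ∧ ∀ e ∈ sorted_entries, "spec" ∈ e.map (fun p => p.1))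
instance (sorted_entries : List (List (String × String))) (graph : List (String × List String)) (max_batch_size : Int) : Decidable (Pre_compute_parallel_batches_py sorted_entries graph max_batch_size) := by unfold Pre_compute_parallel_batches_py; infer_instance

def pvWitness_compute_parallel_batches_py : (List (List (String × String))) × (List (String × List String)) × Int :=
  ([[("spec", "b"), ("path", "x.py")], [("spec", "a")]], [("b", ["a"])], 1)

def Spec_compute_parallel_batches_py (sorted_entries : List (List (String × String))) (graph : List (String × List String)) (max_batch_size : Int) (out : List (List (List (String × String)))) : Prop := out = compute_parallel_batches_py_alt sorted_entries graph max_batch_size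
instance (sorted_entries : List (List (String × String))) (graph : List (String × List String)) (max_batch_size : Int) (out : List (List (List (String × String)))) : Decidable (Spec_compute_parallel_batches_py sorted_entries graph max_batch_size out) := by unfold Spec_compute_parallel_batches_py; infer_instance

-- ===== CLAIM (what is proved, stated in full; the proofs are below) =====
def Claim_equal_compute_parallel_batches_py : Prop := ∀ (sorted_entries : List (List (String × String))) (graph : List (String × List String)) (max_batch_size : Int), Dom_compute_parallel_batches_py sorted_entries graph max_batch_size → Pre_compute_parallel_batches_py sorted_entries graph max_batch_size → Spec_compute_parallel_batches_py sorted_entries graph max_batch_size (compute_parallel_batches_py sorted_entries graph max_batch_size)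

-- ===== LEMMAS AND PROOFS =====

-- Abstract views of the data both ports compute (proof-side only).
def pvPlan (entries : List (List (String × String))) : PySem.Set String :=
  PySem.Set.ofList (entries.map pvSpecOf)

def pvDep (entries : List (List (String × String))) (graph : List (String × List String)) (s : String) : List String :=
  PySem.Set.inter (PySem.Set.ofList ((PySem.Dict.mk graph).getD s [])) (pvPlan entries)

def pvEnt (entries : List (List (String × String))) (s : String) : List (List (String × String)) :=
  entries.filter (fun e => pvSpecOf e == s)

def pvSucc (entries : List (List (String × String))) (graph : List (String × List String)) (t : String) : List String :=
  (pvPlan entries).filter (fun s => decide (t ∈ pvDep entries graph s))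


-- ---- generic fold/dict lemmas ----

-- a fold of fresh inserts over a Nodup key list is a table lookup
theorem pv_getD_foldl_insert_fn {V : Type} (l : List String) (f : String → V)
    (d : PySem.Dict String V) (dflt : V) (s : String) (h : l.Nodup) :
    (l.foldl (fun d x => d.insert x (f x)) d).getD s dflt
      = if s ∈ l then f s else d.getD s dflt := by
  induction l generalizing d with
  | nil => simp
  | cons x t ih =>
    simp only [List.foldl_cons]
    rw [ih _ (List.Nodup.of_cons h)]
    by_cases hs : s ∈ t
    · simp [hs]
    · by_cases hx : s = x
      · subst hx; simp [hs, PySem.Dict.getD_insert]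
      · simp [hs, hx, PySem.Dict.getD_insert]

-- inner loop of the successors build: append x to the bucket of every u ∈ us
theorem pv_getD_fold_add (us : List String) (x : String)
    (sd : PySem.Dict String (List String)) (hnd : us.Nodup)
    (hx : ∀ u ∈ us, x ∉ sd.getD u []) (t : String) :
    (us.foldl (fun sd u => sd.modify u [] (fun S => PySem.Set.add S x)) sd).getD t []
      = sd.getD t [] ++ (if t ∈ us then [x] else []) := by
  induction us generalizing sd with
  | nil => simp
  | cons u rest ih =>
    simp only [List.foldl_cons]
    have hmod : ∀ w, (sd.modify u [] (fun S => PySem.Set.add S x)).getD w []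
        = if w = u then sd.getD u [] ++ [x] else sd.getD w [] := by
      intro w
      rw [PySem.Dict.getD_modify]
      split_ifs with hw
      · rw [PySem.Set.add_of_not_mem (hx u (by simp))]
      · rfl
    rw [ih _ (List.Nodup.of_cons hnd) ?_]
    · rw [hmod t]
      rcases List.nodup_cons.mp hnd with ⟨hu, _⟩
      by_cases ht : t = u
      · subst ht; simp [hu]
      · simp [ht, List.mem_cons]
    · intro u' hu' hmem
      rw [hmod u'] at hmem
      rcases List.nodup_cons.mp hnd with ⟨hu, _⟩
      have : u' ≠ u := fun he => hu (he ▸ hu')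
      rw [if_neg this] at hmem
      exact hx u' (List.mem_cons_of_mem _ hu') hmem

-- outer loop of the successors build
theorem pv_getD_succ_fold (l : List String) (f : String → List String)
    (sd : PySem.Dict String (List String)) (hnd : l.Nodup)
    (hf : ∀ s, (f s).Nodup)
    (hfresh : ∀ s ∈ l, ∀ t, s ∉ sd.getD t []) (t : String) :
    (l.foldl (fun sd s => (f s).foldl (fun sd u => sd.modify u [] (fun S => PySem.Set.add S s)) sd) sd).getD t []
      = sd.getD t [] ++ l.filter (fun s => decide (t ∈ f s)) := by
  induction l generalizing sd with
  | nil => simp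
  | cons s rest ih =>
    simp only [List.foldl_cons]
    have hstep : ∀ w, ((f s).foldl (fun sd u => sd.modify u [] (fun S => PySem.Set.add S s)) sd).getD w []
        = sd.getD w [] ++ (if w ∈ f s then [s] else []) :=
      fun w => pv_getD_fold_add (f s) s sd (hf s) (fun u _ => hfresh s (by simp) u) w
    rw [ih _ (List.Nodup.of_cons hnd) ?_]
    · rw [hstep t, List.filter_cons]
      rcases List.nodup_cons.mp hnd with ⟨hs, _⟩
      by_cases ht : t ∈ f s
      · simp [ht, List.append_assoc]
      · simp [ht]
    · intro s' hs' w hmem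
      rw [hstep w] at hmem
      rcases List.nodup_cons.mp hnd with ⟨hs, _⟩
      rcases List.mem_append.mp hmem with h | h
      · exact hfresh s' (List.mem_cons_of_mem _ hs') w h
      · rcases List.mem_ite_nil_right.mp h with ⟨_, h2⟩
        have : s' = s := by simpa using h2
        exact hs (this ▸ hs')

-- the in_degree[succ] -= 1 / append-on-zero loop, fully characterised
theorem pv_decFold (L : List String) :
    ∀ (d : PySem.Dict String Int) (acc : List String) (v : String),
      ((L.foldl pvDecStep (d, acc)).1.getD v 0 = d.getD v 0 - (L.count v : Int)) ∧
      (((L.foldl pvDecStep (d, acc)).2.count v : Int)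
        = (acc.count v : Int)
          + (if 1 ≤ d.getD v 0 ∧ d.getD v 0 ≤ (L.count v : Int) then 1 else 0)) := by
  induction L with
  | nil =>
    intro d acc v
    constructor
    · simp
    · simp only [List.foldl_nil, List.count_nil, Nat.cast_zero]
      split_ifs with h
      · omega
      · omega
  | cons x t ih =>
    intro d acc v
    have hstep : pvDecStep (d, acc) x
        = (d.modify x 0 (fun y => y - 1),
           if d.getD x 0 - 1 = 0 then acc ++ [x] else acc) := by
      simp only [pvDecStep, PySem.Dict.getD_modify_self]
      split_ifs <;> rfl
    have hget : ∀ w, (d.modify x 0 (fun y => y - 1)).getD w 0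
        = if w = x then d.getD x 0 - 1 else d.getD w 0 := by
      intro w; rw [PySem.Dict.getD_modify]
    simp only [List.foldl_cons, hstep]
    rcases ih (d.modify x 0 (fun y => y - 1))
        (if d.getD x 0 - 1 = 0 then acc ++ [x] else acc) v with ⟨ih1, ih2⟩
    constructor
    · rw [ih1, hget v, List.count_cons]
      by_cases hv : v = x
      · subst hv; simp only [if_pos rfl, beq_self_eq_true, if_true]; push_cast; omega
      · have hbx : (x == v) = false := by simp [Ne.symm hv]
        rw [if_neg hv, hbx]; simp
    · by_cases hv : v = x
      · subst hv
        rw [ih2, PySem.Dict.getD_modify_self, List.count_cons]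
        simp only [beq_self_eq_true, if_true]
        by_cases hz : d.getD v 0 - 1 = 0
        · rw [if_pos hz, List.count_append]
          simp only [List.count_singleton, beq_self_eq_true, if_true]
          push_cast
          split_ifs <;> omega
        · rw [if_neg hz]
          push_cast
          split_ifs <;> omega
      · have hbx : (x == v) = false := by simp [Ne.symm hv]
        rw [ih2, hget v, if_neg hv, List.count_cons, hbx]
        have hcnt : (if d.getD x 0 - 1 = 0 then acc ++ [x] else acc).count v = acc.count v := by
          split_ifs
          · rw [List.count_append]; simp [List.count_singleton, Ne.symm hv]
          · rfl
        rw [hcnt]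
        simp

-- count of an element in a flatMap of Nodup blocks
theorem pv_count_flatMap (l : List String) (f : String → List String) (v : String)
    (h : ∀ s ∈ l, (f s).Nodup) :
    (l.flatMap f).count v = l.countP (fun s => decide (v ∈ f s)) := by
  induction l with
  | nil => simp
  | cons x t ih =>
    rw [List.flatMap_cons, List.count_append, List.countP_cons]
    rw [ih (fun s hs => h s (List.mem_cons_of_mem _ hs))]
    by_cases hv : v ∈ f x
    · rw [List.count_eq_one_of_mem (h x (by simp)) hv]; simp [hv, Nat.add_comm]
    · rw [List.count_eq_zero.mpr hv]; simp [hv]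

-- |l₁ ∩ l₂| is symmetric for Nodup lists
theorem pv_inter_length_comm (l₁ l₂ : List String) (h₁ : l₁.Nodup) (h₂ : l₂.Nodup) :
    (l₁.filter (fun x => decide (x ∈ l₂))).length = (l₂.filter (fun x => decide (x ∈ l₁))).length := by
  have e₁ : (l₁.filter (fun x => decide (x ∈ l₂))).toFinset = l₁.toFinset ∩ l₂.toFinset := by
    ext a; simp [List.mem_filter]
  have e₂ : (l₂.filter (fun x => decide (x ∈ l₁))).toFinset = l₂.toFinset ∩ l₁.toFinset := by
    ext a; simp [List.mem_filter]
  rw [← List.toFinset_card_of_nodup (List.Nodup.filter _ h₁),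
      ← List.toFinset_card_of_nodup (List.Nodup.filter _ h₂), e₁, e₂, Finset.inter_comm]

-- splitting |dep \ done| into |dep ∩ queue| + |dep \ (done ++ queue)| when queue ∩ done = ∅
theorem pv_filter_split (dep done queue : List String)
    (hdisj : ∀ x ∈ queue, x ∉ done) :
    (dep.filter (fun t => !decide (t ∈ done))).length
      = (dep.filter (fun t => decide (t ∈ queue))).length
        + (dep.filter (fun t => !decide (t ∈ done ++ queue))).length := by
  induction dep with
  | nil => simp
  | cons x t ih =>
    simp only [List.filter_cons]
    by_cases hx1 : x ∈ queue
    · have hx2 : x ∉ done := hdisj x hx1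
      simp [hx1, hx2, List.mem_append, ih]; omega
    · by_cases hx2 : x ∈ done
      · simp [hx1, hx2, List.mem_append, ih]
      · simp [hx1, hx2, List.mem_append, ih]; omega

def pvChunksL (w : List (List (String × String))) (k : Int) : List (List (List (String × String))) :=
  (PySem.List.pyRange 0 (w.length : Int) k).map (fun i => PySem.List.slice w (some i) (some (i + k)))

theorem pvChunksL_cons (k' : Nat) (hk1 : 1 ≤ k') (w : List (List (String × String))) (hw : w ≠ []) :
    pvChunksL w (k' : Int) = w.take k' :: pvChunksL (w.drop k') (k' : Int) := by
  have hk0 : (0 : Int) < (k' : Int) := by exact_mod_cast hk1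
  have hn : 0 < w.length := List.length_pos_iff.mpr hw
  have hcast : ∀ m : Nat, ((((m : Int)) - 0 + (k' : Int) - 1) / (k' : Int)).toNat = (m + k' - 1) / k' := by
    intro m
    have h1 : ((m : Int)) - 0 + (k' : Int) - 1 = ((m + k' - 1 : Nat) : Int) := by push_cast <;> omega
    rw [h1, ← Int.natCast_div, Int.toNat_natCast]
  have hslice0 : PySem.List.slice w (some ((0:Int) + (k' : Int) * ((0:Nat) : Int)))
      (some ((0:Int) + (k' : Int) * ((0:Nat) : Int) + (k' : Int))) = w.take k' := by
    have e1 : (0:Int) + (k' : Int) * ((0:Nat) : Int) = ((0:Nat) : Int) := by push_cast; ring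
    have e2 : (0:Int) + (k' : Int) * ((0:Nat) : Int) + (k' : Int) = ((k' : Nat) : Int) := by push_cast; ring
    rw [e1]
    have e2' : ((0:Nat) : Int) + (k' : Int) = ((k' : Nat) : Int) := by push_cast; ring
    rw [e2', PySem.List.slice_natCast]
    simp
  unfold pvChunksL
  rw [PySem.List.pyRange_of_pos _ _ hk0, PySem.List.pyRange_of_pos _ _ hk0]
  rw [if_pos (by exact_mod_cast hn)]
  have hlen2 : (w.drop k').length = w.length - k' := by simp
  rw [hlen2]
  simp only [hcast]
  by_cases hle : w.length ≤ k'
  · have h : (w.length + k' - 1) / k' = 1 := Nat.div_eq_of_lt_le (by omega) (by omega)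
    have hz : w.length - k' = 0 := by omega
    rw [h, hz]
    rw [if_neg (by simp)]
    simp only [List.range_zero, List.map_nil, List.range_one, List.map_cons, List.map_nil]
    rw [hslice0]
  · have h : (w.length + k' - 1) / k' = (w.length - k' + k' - 1) / k' + 1 := by
      have e : w.length + k' - 1 = (w.length - k' + k' - 1) + k' := by omega
      rw [e, Nat.add_div_right _ (by omega)]
    rw [h]
    rw [if_pos (by exact_mod_cast (by omega : 0 < w.length - k'))]
    rw [List.range_succ_eq_map]
    simp only [List.map_cons, List.map_map]
    rw [hslice0]
    congr 1
    apply List.map_congr_left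
    intro j _
    simp only [Function.comp]
    have e1 : (0:Int) + (k' : Int) * ((Nat.succ j : Nat) : Int) = (((k' * (j+1)) : Nat) : Int) := by
      push_cast; ring
    have e2 : (((k' * (j+1)) : Nat) : Int) + (k' : Int) = (((k' * (j+1) + k') : Nat) : Int) := by
      push_cast; ring
    have e3 : (0:Int) + (k' : Int) * ((j : Nat) : Int) = (((k' * j) : Nat) : Int) := by push_cast; ring
    have e4 : (((k' * j) : Nat) : Int) + (k' : Int) = (((k' * j + k') : Nat) : Int) := by
      push_cast; ring
    rw [e1, e2, e3, e4, PySem.List.slice_natCast, PySem.List.slice_natCast]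
    rw [List.drop_drop]
    have en1 : k' * (j+1) + k' - k' * (j+1) = k' := Nat.add_sub_cancel_left _ _
    have en2 : k' * j + k' - k' * j = k' := Nat.add_sub_cancel_left _ _
    have ed : k' + k' * j = k' * (j+1) := by ring
    rw [en1, en2, ed]

theorem pvChunksL_nil (k : Int) : pvChunksL [] k = [] := by
  simp [pvChunksL, PySem.List.pyRange]

theorem pvChunksL_neg {k : Int} (hk : k < 0) (w : List (List (String × String))) :
    pvChunksL w k = [] := by
  unfold pvChunksL PySem.List.pyRange
  have h0 : ¬(k = 0) := by omega
  have h1 : ¬(0 < k) := by omega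
  have h2 : ¬((w.length : Int) < 0) := by simp
  simp [h0, h1, h2]

theorem pvChunksL_flatten {k : Int} (hk : 1 ≤ k) (w : List (List (String × String))) :
    (pvChunksL w k).flatten = w := by
  obtain ⟨k', hkk⟩ : ∃ k' : Nat, k = (k' : Int) := ⟨k.toNat, (Int.toNat_of_nonneg (by omega)).symm⟩
  subst hkk
  have hk1 : 1 ≤ k' := by exact_mod_cast hk
  have main : ∀ (n : Nat) (w : List (List (String × String))), w.length = n →
      (pvChunksL w (k' : Int)).flatten = w := by
    intro n
    induction n using Nat.strong_induction_on with
    | _ n ih =>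
      intro w hw
      rcases eq_or_ne w [] with rfl | hne
      · simp [pvChunksL_nil]
      · rw [pvChunksL_cons k' hk1 w hne, List.flatten_cons]
        have hlt : (w.drop k').length < n := by
          have := List.length_pos_iff.mpr hne
          simp only [List.length_drop]
          omega
        rw [ih _ hlt (w.drop k') rfl, List.take_append_drop]
  exact main w.length w rfl

-- ---- chunking lemmas ----

theorem pvChunks_eq (bs : List (List (List (String × String)))) (w : List (List (String × String))) (k : Int) :
    pvChunks bs w k = bs ++ pvChunksL w k :=
  PySem.List.foldl_append_singleton_eq_map _ _ _

-- ---- basic facts about the abstract views ----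

theorem pvPlan_nodup (entries : List (List (String × String))) : (pvPlan entries).Nodup :=
  PySem.Set.nodup_ofList _

theorem pvDep_nodup (entries : List (List (String × String))) (graph : List (String × List String)) (s : String) :
    (pvDep entries graph s).Nodup :=
  PySem.Set.nodup_inter _ _ (PySem.Set.nodup_ofList _)

theorem pvEnt_spec (entries : List (List (String × String))) (s : String)
    (e : List (String × String)) (h : e ∈ pvEnt entries s) : pvSpecOf e = s := by
  have := (List.mem_filter.mp h).2
  simpa using this

theorem pvEnt_ne_nil (entries : List (List (String × String))) (s : String)
    (h : s ∈ pvPlan entries) : pvEnt entries s ≠ [] := by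
  have hm := (PySem.Set.mem_ofList _ _).mp h
  rcases List.mem_map.mp hm with ⟨e, he, hs⟩
  have : e ∈ pvEnt entries s := List.mem_filter.mpr ⟨he, by simp [hs]⟩
  exact List.ne_nil_of_mem this

theorem pvSucc_nodup (entries : List (List (String × String))) (graph : List (String × List String)) (t : String) :
    (pvSucc entries graph t).Nodup :=
  List.Nodup.filter _ (pvPlan_nodup entries)

theorem mem_pvSucc (entries : List (List (String × String))) (graph : List (String × List String)) (t v : String) :
    v ∈ pvSucc entries graph t ↔ v ∈ pvPlan entries ∧ t ∈ pvDep entries graph v := by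
  simp [pvSucc, List.mem_filter]

-- ---- the common post-processing of both ports ----

def pvRemaining (entries : List (List (String × String)))
    (bs : List (List (List (String × String)))) : List String :=
  PySem.List.sorted
    (PySem.Set.diff (pvPlan entries) (PySem.Set.ofList (bs.flatten.map pvSpecOf))) (fun x => x) false

def pvPostA (entries : List (List (String × String))) (k : Int)
    (ed : PySem.Dict String (List (List (String × String))))
    (bs : List (List (List (String × String)))) : List (List (List (String × String))) :=
  if pvRemaining entries bs = [] then bs
  else pvChunks bs ((pvRemaining entries bs).foldl (fun acc s => acc ++ ed.getD s []) []) k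

def pvPostB (k : Int) (ed : PySem.Dict String (List (List (String × String))))
    (r : List (List (List (String × String))) × PySem.Set String) : List (List (List (String × String))) :=
  if r.2 = [] then r.1
  else pvChunks r.1 ((PySem.List.sorted r.2 (fun x => x) false).flatMap (fun s => ed.getD s [])) k

-- the two post-processings agree whenever batches hold exactly the entries of `done`
theorem pv_final_eq (entries : List (List (String × String))) (graph : List (String × List String)) (k : Int)
    (ed : PySem.Dict String (List (List (String × String))))
    (done alive : List String) (batches : List (List (List (String × String))))
    (hnd_alive : alive.Nodup)
    (hdisj : ∀ x ∈ done, x ∉ alive)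
    (hcover : ∀ x, x ∈ pvPlan entries ↔ x ∈ done ∨ x ∈ alive)
    (hflat : batches.flatten = done.flatMap (fun s => pvEnt entries s)) :
    pvPostA entries k ed batches = pvPostB k ed (batches, alive) := by
  have hdone_plan : ∀ x ∈ done, x ∈ pvPlan entries := fun x hx => (hcover x).mpr (Or.inl hx)
  have hvis : ∀ x, x ∈ PySem.Set.ofList (batches.flatten.map pvSpecOf) ↔ x ∈ done := by
    intro x
    rw [PySem.Set.mem_ofList _ _, hflat, List.map_flatMap]
    constructor
    · intro hx
      rcases List.mem_flatMap.mp hx with ⟨s, hs, hxs⟩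
      rcases List.mem_map.mp hxs with ⟨e, he, hspec⟩
      have := pvEnt_spec entries s e he
      rw [← hspec, this]
      exact hs
    · intro hx
      refine List.mem_flatMap.mpr ⟨x, hx, ?_⟩
      rcases List.exists_mem_of_ne_nil _ (pvEnt_ne_nil entries x (hdone_plan x hx)) with ⟨e, he⟩
      exact List.mem_map.mpr ⟨e, he, pvEnt_spec entries x e he⟩
  have hdiff : ∀ x, x ∈ PySem.Set.diff (pvPlan entries) (PySem.Set.ofList (batches.flatten.map pvSpecOf)) ↔ x ∈ alive := by
    intro x
    rw [PySem.Set.mem_diff _ _ _, hvis]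
    constructor
    · rintro ⟨hP, hnd⟩
      rcases (hcover x).mp hP with h | h
      · exact absurd h hnd
      · exact h
    · intro ha
      refine ⟨(hcover x).mpr (Or.inr ha), fun hd => hdisj x hd ha⟩
  have hperm : (PySem.Set.diff (pvPlan entries) (PySem.Set.ofList (batches.flatten.map pvSpecOf))).Perm alive :=
    (List.perm_ext_iff_of_nodup (PySem.Set.nodup_diff _ _ (pvPlan_nodup entries)) hnd_alive).mpr hdiff
  have hsort : PySem.List.sorted (PySem.Set.diff (pvPlan entries) (PySem.Set.ofList (batches.flatten.map pvSpecOf))) (fun x => x) false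
      = PySem.List.sorted alive (fun x => x) false :=
    PySem.List.sorted_eq_sorted_of_perm _ _ _ (fun a b h => h) hperm
  unfold pvPostA pvPostB pvRemaining
  simp only [hsort]
  by_cases ha : alive = []
  · subst ha
    simp [PySem.List.sorted_eq_nil_iff]
  · have h1 : PySem.List.sorted alive (fun x => x) false ≠ [] := by
      rw [Ne, PySem.List.sorted_eq_nil_iff]; exact ha
    rw [if_neg h1, if_neg ha]
    rw [PySem.List.foldl_append_eq_flatMap]
    simp only [List.nil_append]

-- ---- the loops never touch batches when k < 0 (range(0, n, k) is empty) ----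

theorem pvKahnLoop_neg {k : Int} (hk : k < 0) (sd : PySem.Dict String (List String))
    (ed : PySem.Dict String (List (List (String × String)))) :
    ∀ (fuel : Nat) (ind : PySem.Dict String Int) (queue : List String)
      (bs : List (List (List (String × String)))),
      pvKahnLoop sd ed k fuel ind queue bs = bs := by
  intro fuel
  induction fuel with
  | zero => intro ind queue bs; rfl
  | succ n ih =>
    intro ind queue bs
    rw [pvKahnLoop]
    by_cases hq : queue = []
    · rw [if_pos hq]
    · rw [if_neg hq]
      simp only [pvChunks_eq, pvChunksL_neg hk, List.append_nil]
      exact ih _ _ _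

theorem pvPeelLoop_neg {k : Int} (hk : k < 0) (dd : PySem.Dict String (List String))
    (ed : PySem.Dict String (List (List (String × String)))) :
    ∀ (fuel : Nat) (alive done : PySem.Set String)
      (bs : List (List (List (String × String)))),
      (pvPeelLoop dd ed k fuel alive done bs).1 = bs := by
  intro fuel
  induction fuel with
  | zero => intro alive done bs; rfl
  | succ n ih =>
    intro alive done bs
    rw [pvPeelLoop]
    split
    · rfl
    · simp only [pvChunks_eq, pvChunksL_neg hk, List.append_nil]
      exact ih _ _ _

-- ---- the loop invariant relating A's Kahn state to B's peeling state ----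

structure pvInv (entries : List (List (String × String))) (graph : List (String × List String))
    (done alive queue : List String) (ind : PySem.Dict String Int)
    (batches : List (List (List (String × String)))) : Prop where
  nd_done : done.Nodup
  nd_alive : alive.Nodup
  disj : ∀ x ∈ done, x ∉ alive
  cover : ∀ x, x ∈ pvPlan entries ↔ x ∈ done ∨ x ∈ alive
  closed : ∀ v ∈ done, ∀ t ∈ pvDep entries graph v, t ∈ done
  qeq : queue = PySem.List.sorted
    (alive.filter (fun s => PySem.Set.issubset (pvDep entries graph s) done)) (fun x => x) false
  ind_eq : ∀ v ∈ alive, ind.getD v 0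
    = (((pvDep entries graph v).filter (fun t => !decide (t ∈ done))).length : Int)
  flat : batches.flatten = done.flatMap (fun s => pvEnt entries s)

theorem pv_loop_main (entries : List (List (String × String))) (graph : List (String × List String))
    (k : Int) (hk : 1 ≤ k)
    (sd dd : PySem.Dict String (List String)) (ed : PySem.Dict String (List (List (String × String))))
    (hsd : ∀ t, sd.getD t [] = pvSucc entries graph t)
    (hdd : ∀ s, s ∈ pvPlan entries → dd.getD s [] = pvDep entries graph s)
    (hed : ∀ s, ed.getD s [] = pvEnt entries s) :
    ∀ (fuel : Nat) (done alive queue : List String) (ind : PySem.Dict String Int)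
      (batches : List (List (List (String × String)))),
      pvInv entries graph done alive queue ind batches →
      pvPostA entries k ed (pvKahnLoop sd ed k fuel ind queue batches)
        = pvPostB k ed (pvPeelLoop dd ed k fuel alive done batches) := by
  intro fuel
  induction fuel with
  | zero =>
    intro done alive queue ind batches hI
    exact pv_final_eq entries graph k ed done alive batches hI.nd_alive hI.disj hI.cover hI.flat
  | succ n ih =>
    intro done alive queue ind batches hI
    have hed' : (fun s => ed.getD s []) = (fun s => pvEnt entries s) := funext hed
    have hsd' : (fun s => sd.getD s []) = (fun s => pvSucc entries graph s) := funext hsd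
    -- B's current equals A's queue
    have hcur : PySem.List.sorted
        (alive.filter (fun s => PySem.Set.issubset (dd.getD s []) done)) (fun x => x) false = queue := by
      rw [hI.qeq]
      congr 1
      apply List.filter_congr
      intro s hs
      rw [hdd s ((hI.cover s).mpr (Or.inr hs))]
    rw [pvKahnLoop, pvPeelLoop, hcur]
    by_cases hq : queue = []
    · rw [if_pos hq, if_pos hq]
      exact pv_final_eq entries graph k ed done alive batches hI.nd_alive hI.disj hI.cover hI.flat
    · rw [if_neg hq, if_neg hq]
      -- facts about queue
      have hq_iff : ∀ s, s ∈ queue ↔ s ∈ alive ∧ ∀ t ∈ pvDep entries graph s, t ∈ done := by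
        intro s
        rw [hI.qeq, PySem.List.mem_sorted, List.mem_filter]
        constructor
        · rintro ⟨h1, h2⟩; exact ⟨h1, (PySem.Set.issubset_iff _ _).mp h2⟩
        · rintro ⟨h1, h2⟩; exact ⟨h1, (PySem.Set.issubset_iff _ _).mpr h2⟩
      have hnd_q : queue.Nodup := by
        rw [hI.qeq]
        exact ((PySem.List.sorted_perm _ _ _).nodup_iff).mpr (List.Nodup.filter _ hI.nd_alive)
      have hq_alive : ∀ s ∈ queue, s ∈ alive := fun s hs => ((hq_iff s).mp hs).1
      have hq_done : ∀ s ∈ queue, s ∉ done := fun s hs hd => hI.disj s hd (hq_alive s hs)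
      have hq_plan : ∀ s ∈ queue, s ∈ pvPlan entries :=
        fun s hs => (hI.cover s).mpr (Or.inr (hq_alive s hs))
      -- A's wave entries are queue.flatMap
      rw [PySem.List.foldl_append_eq_flatMap, List.nil_append]
      -- A's decrement fold over the concatenated successor lists
      rw [← List.foldl_flatMap]
      rw [hsd']
      set L : List String := queue.flatMap (fun s => pvSucc entries graph s) with hL
      set st := L.foldl pvDecStep (ind, ([] : List String)) with hst
      -- dict and next-queue characterisation
      have hdec := pv_decFold L ind [] 
      have hst1 : ∀ v, st.1.getD v 0 = ind.getD v 0 - (L.count v : Int) :=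
        fun v => (hdec v).1
      have hst2 : ∀ v, ((st.2.count v : Int))
          = (if 1 ≤ ind.getD v 0 ∧ ind.getD v 0 ≤ (L.count v : Int) then 1 else 0) := by
        intro v
        have := (hdec v).2
        simpa using this
      -- count of decrements of v = |dep v ∩ queue| (for v in the plan)
      have hLcnt : ∀ v ∈ pvPlan entries,
          (L.count v) = ((pvDep entries graph v).filter (fun t => decide (t ∈ queue))).length := by
        intro v hv
        rw [hL, pv_count_flatMap _ _ _ (fun s _ => pvSucc_nodup entries graph s)]
        have h1 : queue.countP (fun s => decide (v ∈ pvSucc entries graph s))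
            = queue.countP (fun s => decide (s ∈ pvDep entries graph v)) := by
          apply List.countP_congr
          intro s _
          simp only [decide_eq_true_eq, mem_pvSucc]
          constructor
          · rintro ⟨_, h⟩; exact h
          · intro h; exact ⟨hv, h⟩
        rw [h1, List.countP_eq_length_filter]
        exact pv_inter_length_comm queue (pvDep entries graph v) hnd_q (pvDep_nodup entries graph v)
      have hLcnt0 : ∀ v, v ∉ pvPlan entries → L.count v = 0 := by
        intro v hv
        rw [hL, pv_count_flatMap _ _ _ (fun s _ => pvSucc_nodup entries graph s)]
        apply List.countP_eq_zero.mpr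
        intro s _
        simp only [decide_eq_true_eq, mem_pvSucc]
        rintro ⟨h, _⟩
        exact hv h
      -- next_queue is Nodup
      have hnd_nq : st.2.Nodup := by
        rw [List.nodup_iff_count_le_one]
        intro v
        have := hst2 v
        by_cases h : 1 ≤ ind.getD v 0 ∧ ind.getD v 0 ≤ (L.count v : Int)
        · rw [if_pos h] at this; omega
        · rw [if_neg h] at this; omega
      -- membership in next_queue
      have hmem_nq : ∀ v, v ∈ st.2 ↔
          (v ∈ alive ∧ v ∉ queue ∧ ∀ t ∈ pvDep entries graph v, t ∈ done ∨ t ∈ queue) := by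
        intro v
        have hc := hst2 v
        constructor
        · intro hv
          have hpos : 0 < st.2.count v := List.count_pos_iff.mpr hv
          have hcond : 1 ≤ ind.getD v 0 ∧ ind.getD v 0 ≤ (L.count v : Int) := by
            by_contra hcc
            rw [if_neg hcc] at hc
            omega
          have hvP : v ∈ pvPlan entries := by
            by_contra hvp
            have h0 := hLcnt0 v hvp
            rw [h0] at hcond
            simp at hcond
            omega
          rcases (hI.cover v).mp hvP with hvd | hva
          · exfalso
            have hsub := hI.closed v hvd
            have hnilq : (pvDep entries graph v).filter (fun t => decide (t ∈ queue)) = [] := by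
              apply List.filter_eq_nil_iff.mpr
              intro t ht
              simp only [decide_eq_true_eq]
              exact fun htq => hq_done t htq (hsub t ht)
            have hl := hLcnt v hvP
            rw [hnilq] at hl
            simp at hl
            rw [hl] at hcond
            simp at hcond
            omega
          · have hm1 := hI.ind_eq v hva
            have hvq : v ∉ queue := by
              intro hvq
              have hready := ((hq_iff v).mp hvq).2
              have hnil : (pvDep entries graph v).filter (fun t => !decide (t ∈ done)) = [] := by
                apply List.filter_eq_nil_iff.mpr
                intro t ht
                simp [hready t ht]
              rw [hnil] at hm1
              simp at hm1
              omega
            refine ⟨hva, hvq, ?_⟩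
            have hsplit := pv_filter_split (pvDep entries graph v) done queue hq_done
            have hl := hLcnt v hvP
            have hm3 : ((pvDep entries graph v).filter (fun t => !decide (t ∈ done ++ queue))).length = 0 := by
              rw [hm1, hl] at hcond
              push_cast at hcond
              omega
            intro t ht
            have hnil := List.length_eq_zero_iff.mp hm3
            have := List.filter_eq_nil_iff.mp hnil t ht
            simp only [Bool.not_eq_true', decide_eq_false_iff_not] at this
            rcases List.mem_append.mp (not_not.mp (by simpa using this)) with h | h
            · exact Or.inl h
            · exact Or.inr h
        · rintro ⟨hva, hvq, hdq⟩
          have hvP : v ∈ pvPlan entries := (hI.cover v).mpr (Or.inr hva)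
          have hm1 := hI.ind_eq v hva
          have hl := hLcnt v hvP
          have hsplit := pv_filter_split (pvDep entries graph v) done queue hq_done
          have hm3 : ((pvDep entries graph v).filter (fun t => !decide (t ∈ done ++ queue))).length = 0 := by
            rw [List.length_eq_zero_iff]
            apply List.filter_eq_nil_iff.mpr
            intro t ht
            simp only [Bool.not_eq_true', decide_eq_false_iff_not, not_not]
            exact List.mem_append.mpr (hdq t ht)
          have hm1pos : 1 ≤ ((pvDep entries graph v).filter (fun t => !decide (t ∈ done))).length := by
            by_contra hz
            have hz0 : ((pvDep entries graph v).filter (fun t => !decide (t ∈ done))).length = 0 := by omega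
            have hnil := List.length_eq_zero_iff.mp hz0
            have hready : ∀ t ∈ pvDep entries graph v, t ∈ done := by
              intro t ht
              have := List.filter_eq_nil_iff.mp hnil t ht
              simpa using this
            exact hvq ((hq_iff v).mpr ⟨hva, hready⟩)
          have hcond : 1 ≤ ind.getD v 0 ∧ ind.getD v 0 ≤ (L.count v : Int) := by
            rw [hm1, hl]
            constructor
            · push_cast; omega
            · push_cast; omega
          rw [if_pos hcond] at hc
          have : 0 < st.2.count v := by omega
          exact List.count_pos_iff.mp this
      -- new-state bookkeeping
      have hof : PySem.Set.ofList queue = queue := PySem.Set.ofList_eq_self_of_nodup _ hnd_q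
      have hunion : PySem.Set.union done (PySem.Set.ofList queue) = done ++ queue := by
        rw [hof]
        exact PySem.Set.update_eq_append_of_disjoint done queue hnd_q hq_done
      rw [hunion, hof]
      -- apply the induction hypothesis at the new state
      apply ih
      refine ⟨?_, PySem.Set.nodup_diff _ _ hI.nd_alive, ?_, ?_, ?_, ?_, ?_, ?_⟩
      · rw [List.nodup_append]
        refine ⟨hI.nd_done, hnd_q, ?_⟩
        intro a ha b hb heq
        exact hq_done b hb (heq ▸ ha)
      · intro x hx hxd
        rcases (PySem.Set.mem_diff _ _ _).mp hxd with ⟨ha, hnq'⟩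
        rcases List.mem_append.mp hx with h | h
        · exact hI.disj x h ha
        · exact hnq' h
      · intro x
        rw [List.mem_append, PySem.Set.mem_diff]
        constructor
        · intro hP
          rcases (hI.cover x).mp hP with hd | ha
          · exact Or.inl (Or.inl hd)
          · by_cases hxq : x ∈ queue
            · exact Or.inl (Or.inr hxq)
            · exact Or.inr ⟨ha, hxq⟩
        · rintro ((hd | hq') | ⟨ha, _⟩)
          · exact (hI.cover x).mpr (Or.inl hd)
          · exact (hI.cover x).mpr (Or.inr (hq_alive x hq'))
          · exact (hI.cover x).mpr (Or.inr ha)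
      · intro v hv t ht
        rcases List.mem_append.mp hv with h | h
        · exact List.mem_append.mpr (Or.inl (hI.closed v h t ht))
        · exact List.mem_append.mpr (Or.inl (((hq_iff v).mp h).2 t ht))
      · apply PySem.List.sorted_eq_sorted_of_perm _ _ _ (fun a b h => h)
        apply (List.perm_ext_iff_of_nodup hnd_nq
          (List.Nodup.filter _ (PySem.Set.nodup_diff _ _ hI.nd_alive))).mpr
        intro v
        rw [hmem_nq v, List.mem_filter, PySem.Set.mem_diff]
        constructor
        · rintro ⟨ha, hnq', hdq⟩
          refine ⟨⟨ha, hnq'⟩, ?_⟩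
          apply (PySem.Set.issubset_iff _ _).mpr
          intro t ht
          exact List.mem_append.mpr (hdq t ht)
        · rintro ⟨⟨ha, hnq'⟩, hsub⟩
          refine ⟨ha, hnq', fun t ht => ?_⟩
          exact List.mem_append.mp ((PySem.Set.issubset_iff _ _).mp hsub t ht)
      · intro v hv
        rcases (PySem.Set.mem_diff _ _ _).mp hv with ⟨ha, _⟩
        rw [hst1 v, hI.ind_eq v ha, hLcnt v ((hI.cover v).mpr (Or.inr ha))]
        have hsplit := pv_filter_split (pvDep entries graph v) done queue hq_done
        push_cast
        omega
      · rw [pvChunks_eq, List.flatten_append, pvChunksL_flatten hk, hI.flat, hed']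
        rw [← List.flatMap_append]


-- ---- the concrete dictionaries port A / port B build, and their lookups ----

theorem pvSetEmpty : (PySem.Set.empty : PySem.Set String) = [] := rfl

def pvED (entries : List (List (String × String))) : PySem.Dict String (List (List (String × String))) :=
  entries.foldl (fun d e => d.modify (pvSpecOf e) [] (fun l => l ++ [e])) PySem.Dict.empty

def pvSubDict (entries : List (List (String × String))) (graph : List (String × List String)) :
    PySem.Dict String (List String) :=
  (pvPlan entries).foldl (fun d spec =>
    d.insert spec (PySem.Set.inter (PySem.Set.ofList ((PySem.Dict.mk graph).getD spec [])) (pvPlan entries)))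
    PySem.Dict.empty

def pvInd0 (entries : List (List (String × String))) : PySem.Dict String Int :=
  (pvPlan entries).foldl (fun d s => d.insert s 0) PySem.Dict.empty

def pvSucc0 (entries : List (List (String × String))) : PySem.Dict String (List String) :=
  (pvPlan entries).foldl (fun d s => d.insert s PySem.Set.empty) PySem.Dict.empty

def pvSt (entries : List (List (String × String))) (graph : List (String × List String)) :
    PySem.Dict String Int × PySem.Dict String (List String) :=
  (pvSubDict entries graph).items.foldl (fun st p =>
    (st.1.insert p.1 ((p.2.length : Int)),
     p.2.foldl (fun sd dep => sd.modify dep PySem.Set.empty (fun S => PySem.Set.add S p.1)) st.2))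
    (pvInd0 entries, pvSucc0 entries)

def pvQ0 (entries : List (List (String × String))) (graph : List (String × List String)) : List String :=
  PySem.List.sorted ((pvPlan entries).filter (fun s => (pvSt entries graph).1.getD s 0 == 0)) (fun x => x) false

theorem pvA_unfold (entries : List (List (String × String))) (graph : List (String × List String))
    (k : Int) (hne : entries ≠ []) :
    compute_parallel_batches_py entries graph k
      = pvPostA entries k (pvED entries)
          (pvKahnLoop (pvSt entries graph).2 (pvED entries) k (entries.length + 1)
            (pvSt entries graph).1 (pvQ0 entries graph) []) := by
  rw [compute_parallel_batches_py, if_neg hne]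
  rfl

theorem pvB_unfold (entries : List (List (String × String))) (graph : List (String × List String))
    (k : Int) (hne : entries ≠ []) :
    compute_parallel_batches_py_alt entries graph k
      = pvPostB k (pvED entries)
          (pvPeelLoop (pvSubDict entries graph) (pvED entries) k (entries.length + 1)
            (pvPlan entries) PySem.Set.empty []) := by
  rw [compute_parallel_batches_py_alt, if_neg hne]
  rfl

theorem pvED_getD (entries : List (List (String × String))) (s : String) :
    (pvED entries).getD s [] = pvEnt entries s := by
  have hfold : (entries.map (fun x => (pvSpecOf x, x))).foldl
      (fun d p => d.modify p.1 [] (fun l => l ++ [p.2])) PySem.Dict.empty = pvED entries := by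
    rw [List.foldl_map]
    rfl
  rw [← hfold, PySem.Dict.getD_foldl_modify_append]
  simp [pvEnt, List.filter_map, List.map_map, Function.comp_def]

theorem pvSubDict_getD (entries : List (List (String × String))) (graph : List (String × List String))
    (s : String) (hs : s ∈ pvPlan entries) :
    (pvSubDict entries graph).getD s [] = pvDep entries graph s := by
  unfold pvSubDict
  rw [pv_getD_foldl_insert_fn _ _ _ _ _ (pvPlan_nodup entries), if_pos hs]
  rfl

theorem pvSubDict_items (entries : List (List (String × String))) (graph : List (String × List String)) :
    (pvSubDict entries graph).items = (pvPlan entries).map (fun s => (s, pvDep entries graph s)) := by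
  unfold pvSubDict
  have := PySem.Dict.items_foldl_insert_fresh (pvPlan entries) (fun s => s)
    (fun s => pvDep entries graph s) PySem.Dict.empty
    (fun a _ => PySem.Dict.contains_empty a) (by simpa using pvPlan_nodup entries)
  simpa [pvDep] using this

theorem pvSucc0_getD (entries : List (List (String × String))) (t : String) :
    (pvSucc0 entries).getD t [] = [] := by
  unfold pvSucc0
  rw [pv_getD_foldl_insert_fn _ _ _ _ _ (pvPlan_nodup entries)]
  split <;> rfl

theorem pvSt_eq (entries : List (List (String × String))) (graph : List (String × List String)) :
    pvSt entries graph =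
      ((pvSubDict entries graph).items.foldl
          (fun d p => d.insert p.1 ((p.2.length : Int))) (pvInd0 entries),
       (pvSubDict entries graph).items.foldl
          (fun sd p => p.2.foldl (fun sd' dep => sd'.modify dep PySem.Set.empty (fun S => PySem.Set.add S p.1)) sd)
          (pvSucc0 entries)) := by
  unfold pvSt
  exact PySem.List.foldl_prod_mk
    (fun (d : PySem.Dict String Int) (p : String × List String) => d.insert p.1 ((p.2.length : Int)))
    (fun (sd : PySem.Dict String (List String)) (p : String × List String) =>
      p.2.foldl (fun sd' dep => sd'.modify dep PySem.Set.empty (fun S => PySem.Set.add S p.1)) sd)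
    ((pvSubDict entries graph).items) (pvInd0 entries) (pvSucc0 entries)

theorem pvSt_fst (entries : List (List (String × String))) (graph : List (String × List String))
    (s : String) (hs : s ∈ pvPlan entries) :
    (pvSt entries graph).1.getD s 0 = ((pvDep entries graph s).length : Int) := by
  have h := pv_getD_foldl_insert_fn (pvPlan entries)
    (fun x => ((pvDep entries graph x).length : Int)) (pvInd0 entries) 0 s (pvPlan_nodup entries)
  rw [pvSt_eq]
  simp only [pvSubDict_items, List.foldl_map]
  rw [h, if_pos hs]

theorem pvSt_snd (entries : List (List (String × String))) (graph : List (String × List String))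
    (t : String) :
    (pvSt entries graph).2.getD t [] = pvSucc entries graph t := by
  have h := pv_getD_succ_fold (pvPlan entries) (pvDep entries graph) (pvSucc0 entries)
    (pvPlan_nodup entries) (pvDep_nodup entries graph)
    (fun s _ u => by rw [pvSucc0_getD]; exact List.not_mem_nil) t
  rw [pvSt_eq]
  simp only [pvSubDict_items, List.foldl_map, pvSetEmpty]
  rw [h, pvSucc0_getD]
  rfl

theorem pv_initial_inv (entries : List (List (String × String))) (graph : List (String × List String)) :
    pvInv entries graph [] (pvPlan entries) (pvQ0 entries graph) (pvSt entries graph).1 [] := by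
  refine ⟨List.nodup_nil, pvPlan_nodup entries, by simp, by simp, by simp, ?_, ?_, by simp⟩
  · unfold pvQ0
    congr 1
    apply List.filter_congr
    intro s hs
    rw [pvSt_fst entries graph s hs]
    rcases h : pvDep entries graph s with _ | ⟨a, t⟩
    · simp [PySem.Set.issubset]
    · simp [PySem.Set.issubset]
      omega
  · intro v hv
    rw [pvSt_fst entries graph v hv]
    congr 1
    simp

theorem pv_spec_main (entries : List (List (String × String))) (graph : List (String × List String))
    (k : Int) (hPre : Pre_compute_parallel_batches_py entries graph k) :
    compute_parallel_batches_py entries graph k = compute_parallel_batches_py_alt entries graph k := by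
  by_cases hne : entries = []
  · subst hne
    simp [compute_parallel_batches_py, compute_parallel_batches_py_alt]
  · have hk0 : k ≠ 0 := by
      rcases hPre with h | ⟨hk, _⟩
      · exact absurd h hne
      · exact hk
    rw [pvA_unfold entries graph k hne, pvB_unfold entries graph k hne]
    by_cases hk1 : 1 ≤ k
    · exact pv_loop_main entries graph k hk1 _ _ _
        (pvSt_snd entries graph) (pvSubDict_getD entries graph) (pvED_getD entries)
        (entries.length + 1) [] (pvPlan entries) (pvQ0 entries graph) (pvSt entries graph).1 []
        (pv_initial_inv entries graph)
    · have hkneg : k < 0 := by omega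
      have hposta : pvPostA entries k (pvED entries) [] = [] := by
        unfold pvPostA
        split
        · rfl
        · rw [pvChunks_eq, pvChunksL_neg hkneg]; rfl
      have hpostb : ∀ r : List (List (List (String × String))) × PySem.Set String,
          r.1 = [] → pvPostB k (pvED entries) r = [] := by
        intro r hr
        unfold pvPostB
        split
        · exact hr
        · rw [pvChunks_eq, pvChunksL_neg hkneg, hr]; rfl
      rw [pvKahnLoop_neg hkneg, hposta, hpostb _ (pvPeelLoop_neg hkneg _ _ _ _ _ _)]

-- ===== VERDICT (by name: the statement is the Claim_ definition above) =====
theorem compute_parallel_batches_py_spec : Claim_equal_compute_parallel_batches_py := by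
  intro sorted_entries graph max_batch_size _ hPre
  exact pv_spec_main sorted_entries graph max_batch_size hPre
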